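-- pv_equiv track=rewrite | github.com/houstar/crostestutils | provingground/browsertest_status.py | _CreateResultOfTests
-- ===== SOURCE A (Python) =====
-- _RESULT_TYPES = {
--     'A': 'AUDIO',
--     'C': 'CRASH',
--     'F': 'TEXT',
--     'I': 'IMAGE',
--     'L': 'FLAKY',
--     'O': 'MISSING',
--     'N': 'NO DATA',
--     'Q': 'FAIL',
--     'P': 'PASS',
--     'T': 'TIMEOUT',
--     'Y': 'NOTRUN',
--     'X': 'SKIP',
--     'Z': 'IMAGE+TEXT'
--     }
--
-- _FAILED = 'Failed'
--
-- _PASSED = 'Passed'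
--
-- _MISSING = 'Missing'
--
-- def _CreateResultOfTests(user_tests_results_dict):
--   """Create dictionary of user tests keyed by result.
--
--   Args:
--     user_tests_results_dict: dictionary of user tests to results.
--
--   Returns:
--     Dictionary of results of tests.
--   """
--   # Test result type lists.
--   missing = ['O']
--   passed = ['P']
--   fails = [key for key in _RESULT_TYPES if key not in missing+passed]
--
--   failed_tests = []
--   passed_tests = []
--   missing_tests = []
--   for test in user_tests_results_dict:
--     result = user_tests_results_dict[test][0][1]
--     if result in fails:
--       failed_tests.append(test)
--     elif result in passed:
--       passed_tests.append(test)
--     elif result in missing: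
--       missing_tests.append(test)
--   return {_FAILED: failed_tests,
--           _PASSED: passed_tests,
--           _MISSING: missing_tests}
-- ===== SOURCE B (Python) =====
-- _RESULT_TYPES = {
--     'A': 'AUDIO',
--     'C': 'CRASH',
--     'F': 'TEXT',
--     'I': 'IMAGE',
--     'L': 'FLAKY',
--     'O': 'MISSING',
--     'N': 'NO DATA',
--     'Q': 'FAIL',
--     'P': 'PASS',
--     'T': 'TIMEOUT',
--     'Y': 'NOTRUN',
--     'X': 'SKIP',
--     'Z': 'IMAGE+TEXT'
--     }
--
-- _FAILED = 'Failed'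
--
-- _PASSED = 'Passed'
--
-- _MISSING = 'Missing'
--
-- # Every known code except 'P' (passed) and 'O' (missing) counts as a failure.
-- _FAIL_CODES = frozenset(_RESULT_TYPES) - {'P', 'O'}
--
--
-- def _CreateResultOfTests(user_tests_results_dict):
--   """Create dictionary of user tests keyed by result (three staged filters)."""
--   items = user_tests_results_dict.items()
--   return {
--       _FAILED: [test for test, value in items if value[0][1] in _FAIL_CODES],
--       _PASSED: [test for test, value in items if value[0][1] == 'P'],
--       _MISSING: [test for test, value in items if value[0][1] == 'O'],
--   }
-- ===== Notes on version B (the rewrite author's own statement) =====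
-- stated objective: simpler
-- what changed: Replaces the single accumulator loop with its if/elif membership chain by three independent filter passes (comprehensions) over items(), one per bucket, against a module-level frozenset of failure codes; correct because each entry satisfies at most one of the three disjoint tests.
import Mathlib
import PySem

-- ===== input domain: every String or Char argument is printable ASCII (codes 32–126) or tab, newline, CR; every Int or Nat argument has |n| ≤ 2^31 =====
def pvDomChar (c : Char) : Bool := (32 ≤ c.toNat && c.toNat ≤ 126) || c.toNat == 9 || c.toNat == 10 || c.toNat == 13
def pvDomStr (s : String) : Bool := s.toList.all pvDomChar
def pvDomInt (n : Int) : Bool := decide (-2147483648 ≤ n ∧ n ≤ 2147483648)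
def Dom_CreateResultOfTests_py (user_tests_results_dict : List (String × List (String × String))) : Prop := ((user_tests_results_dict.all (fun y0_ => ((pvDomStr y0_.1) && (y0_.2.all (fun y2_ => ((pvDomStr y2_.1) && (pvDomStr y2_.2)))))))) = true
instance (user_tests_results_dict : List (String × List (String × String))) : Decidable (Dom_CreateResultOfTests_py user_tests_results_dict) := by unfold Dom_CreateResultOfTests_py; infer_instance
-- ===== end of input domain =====

-- B replaces A's single accumulator loop and if/elif membership chain by three independent
-- filter passes over items() against a module-level fail-code set (objective: simpler).


-- module constant _RESULT_TYPES (shared by both versions)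
def pvResultTypes : PySem.Dict String String := PySem.Dict.ofList
  [("A","AUDIO"),("C","CRASH"),("F","TEXT"),("I","IMAGE"),("L","FLAKY"),("O","MISSING"),
   ("N","NO DATA"),("Q","FAIL"),("P","PASS"),("T","TIMEOUT"),("Y","NOTRUN"),("X","SKIP"),
   ("Z","IMAGE+TEXT")]

-- ===== PORT A =====
def CreateResultOfTests_py (user_tests_results_dict : List (String × List (String × String))) : List (String × List String) :=
  let missing : List String := ["O"]
  let passed : List String := ["P"]
  let fails : List String := pvResultTypes.keys.filter (fun key => !((missing ++ passed).contains key))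
  let d : PySem.Dict String (List (String × String)) := PySem.Dict.ofList user_tests_results_dict
  let st := d.keys.foldl
    (fun (st : List String × List String × List String) test =>
      match PySem.List.pyGet? (d.getD test []) 0 with
      | none => st   -- Python raises IndexError here; excluded by Pre_
      | some pair =>
        let result := pair.2
        if fails.contains result then (st.1 ++ [test], st.2.1, st.2.2)
        else if passed.contains result then (st.1, st.2.1 ++ [test], st.2.2)
        else if missing.contains result then (st.1, st.2.1, st.2.2 ++ [test])
        else st)
    ([], [], [])
  [("Failed", st.1), ("Passed", st.2.1), ("Missing", st.2.2)]

-- ===== PORT B =====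
-- _FAIL_CODES = frozenset(_RESULT_TYPES) - {'P', 'O'}  (only membership is used, so order is immaterial)
def pvFailCodes : PySem.Set String :=
  PySem.Set.diff (PySem.Set.ofList pvResultTypes.keys) (PySem.Set.ofList ["P", "O"])

def CreateResultOfTests_py_alt (user_tests_results_dict : List (String × List (String × String))) : List (String × List String) :=
  let items := (PySem.Dict.ofList user_tests_results_dict).items
  [("Failed", (items.filter (fun p => match PySem.List.pyGet? p.2 0 with
      | some pr => pvFailCodes.contains pr.2
      | none => false)).map (·.1)),     -- Python raises IndexError on value = []; excluded by Pre_
   ("Passed", (items.filter (fun p => match PySem.List.pyGet? p.2 0 with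
      | some pr => pr.2 == "P"
      | none => false)).map (·.1)),
   ("Missing", (items.filter (fun p => match PySem.List.pyGet? p.2 0 with
      | some pr => pr.2 == "O"
      | none => false)).map (·.1))]

-- ===== PRECONDITION & SPEC =====
-- Pre_ excludes inputs whose dict carries an empty result list for some test
-- (value[0] then raises IndexError in both A and B).
def Pre_CreateResultOfTests_py (user_tests_results_dict : List (String × List (String × String))) : Prop :=
  ∀ p ∈ (PySem.Dict.ofList user_tests_results_dict).items, p.2 ≠ []
instance (user_tests_results_dict : List (String × List (String × String))) : Decidable (Pre_CreateResultOfTests_py user_tests_results_dict) := by unfold Pre_CreateResultOfTests_py; infer_instance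

def pvWitness_CreateResultOfTests_py : (List (String × List (String × String))) :=
  [("t1", [("sub", "P")]), ("t2", [("sub", "C")]), ("t3", [("sub", "O")])]

def Spec_CreateResultOfTests_py (user_tests_results_dict : List (String × List (String × String))) (out : List (String × List String)) : Prop := out = CreateResultOfTests_py_alt user_tests_results_dict
instance (user_tests_results_dict : List (String × List (String × String))) (out : List (String × List String)) : Decidable (Spec_CreateResultOfTests_py user_tests_results_dict out) := by unfold Spec_CreateResultOfTests_py; infer_instance

-- ===== CLAIM (what is proved, stated in full; the proofs are below) =====
def Claim_equal_CreateResultOfTests_py : Prop := ∀ (user_tests_results_dict : List (String × List (String × String))), Dom_CreateResultOfTests_py user_tests_results_dict → Pre_CreateResultOfTests_py user_tests_results_dict → Spec_CreateResultOfTests_py user_tests_results_dict (CreateResultOfTests_py user_tests_results_dict)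

-- ===== LEMMAS AND PROOFS =====

-- the concrete 'fails' list A computes
def pvFails : List String :=
  pvResultTypes.keys.filter (fun key => !(((["O"] : List String) ++ ["P"]).contains key))

-- membership in A's 'fails' list coincides with membership in B's set of fail codes
lemma fails_eq_failCodes (r : String) : pvFails.contains r = pvFailCodes.contains r := by
  have h1 : pvFails = ["A","C","F","I","L","N","Q","T","Y","X","Z"] := by decide
  have h2 : pvFailCodes = ["A","C","F","I","L","N","Q","T","Y","X","Z"] := by decide
  rw [h1, h2]; rfl

lemma fails_ne (r : String) (h : pvFails.contains r = true) : r ≠ "P" ∧ r ≠ "O" := by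
  constructor <;> rintro rfl <;> revert h <;> decide

-- A's loop body and B's three filter predicates
def stepA (q : List String × List String × List String) (x : String × List (String × String)) :
    List String × List String × List String :=
  match PySem.List.pyGet? x.2 0 with
  | none => q
  | some pair =>
    if pvFails.contains pair.2 then (q.1 ++ [x.1], q.2.1, q.2.2)
    else if (["P"] : List String).contains pair.2 then (q.1, q.2.1 ++ [x.1], q.2.2)
    else if (["O"] : List String).contains pair.2 then (q.1, q.2.1, q.2.2 ++ [x.1])
    else q

def condF (p : String × List (String × String)) : Bool :=
  match PySem.List.pyGet? p.2 0 with
  | some pr => pvFailCodes.contains pr.2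
  | none => false

def condP (p : String × List (String × String)) : Bool :=
  match PySem.List.pyGet? p.2 0 with
  | some pr => pr.2 == "P"
  | none => false

def condO (p : String × List (String × String)) : Bool :=
  match PySem.List.pyGet? p.2 0 with
  | some pr => pr.2 == "O"
  | none => false

-- A's single fold over the items equals B's three staged filters
lemma loop_eq_filters (l : List (String × List (String × String))) :
    ∀ acc : List String × List String × List String,
      l.foldl stepA acc = (acc.1 ++ (l.filter condF).map (·.1),
                           acc.2.1 ++ (l.filter condP).map (·.1),
                           acc.2.2 ++ (l.filter condO).map (·.1)) := by
  induction l with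
  | nil => intro acc; simp
  | cons x t ih =>
    intro acc
    simp only [List.foldl_cons, List.filter_cons]
    rcases hg : PySem.List.pyGet? x.2 0 with _ | pair
    · have : stepA acc x = acc := by simp only [stepA, hg]
      rw [this, ih]
      simp only [condF, condP, condO, hg]
      simp
    · by_cases hF : pvFails.contains pair.2 = true
      · obtain ⟨hP, hO⟩ := fails_ne _ hF
        have e : stepA acc x = (acc.1 ++ [x.1], acc.2.1, acc.2.2) := by
          simp only [stepA, hg, hF, if_true]
        rw [e, ih]
        simp only [condF, condP, condO, hg, ← fails_eq_failCodes, hF]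
        simp [hP, hO]
      · have hFm : pair.2 ∉ pvFails := by simpa [List.contains_iff_mem] using hF
        rw [show stepA acc x = (if pair.2 = "P" then (acc.1, acc.2.1 ++ [x.1], acc.2.2)
              else if pair.2 = "O" then (acc.1, acc.2.1, acc.2.2 ++ [x.1]) else acc) from by
            simp [stepA, hg, hFm]]
        have hF' : pvFailCodes.contains pair.2 = false := by
          rw [← fails_eq_failCodes]; simpa using hF
        have hmem : pair.2 ∉ (pvFailCodes : List String) := by
          simpa [List.contains_iff_mem] using hF'
        by_cases hP : pair.2 = "P"
        · rw [hP] at hmem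
          rw [if_pos hP, ih]
          simp only [condF, condP, condO, hg, hP]
          simp [hmem]
        · by_cases hO : pair.2 = "O"
          · rw [hO] at hmem
            rw [if_neg hP, if_pos hO, ih]
            simp only [condF, condP, condO, hg, hO]
            simp [hmem]
          · rw [if_neg hP, if_neg hO, ih]
            simp only [condF, condP, condO, hg]
            simp [hmem, hP, hO]

-- ===== VERDICT (by name: the statement is the Claim_ definition above) =====
theorem CreateResultOfTests_py_spec : Claim_equal_CreateResultOfTests_py := by
  intro u _ _
  unfold Spec_CreateResultOfTests_py
  show CreateResultOfTests_py u = CreateResultOfTests_py_alt u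
  have hnd : (PySem.Dict.ofList u).keys.Nodup := PySem.Dict.nodup_keys_ofList u
  have hA : (PySem.Dict.ofList u).keys.foldl
      (fun (st : List String × List String × List String) test =>
        stepA st (test, (PySem.Dict.ofList u).getD test [])) ([], [], [])
      = (PySem.Dict.ofList u).items.foldl stepA ([], [], []) := by
    conv_rhs => rw [PySem.Dict.items_eq_map_keys (PySem.Dict.ofList u) hnd
      ([] : List (String × String)), List.foldl_map]
  rw [show CreateResultOfTests_py_alt u =
        [("Failed", (((PySem.Dict.ofList u).items.filter condF).map (·.1))),
         ("Passed", (((PySem.Dict.ofList u).items.filter condP).map (·.1))),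
         ("Missing", (((PySem.Dict.ofList u).items.filter condO).map (·.1)))] from rfl]
  rw [show CreateResultOfTests_py u =
        [("Failed", ((PySem.Dict.ofList u).keys.foldl
            (fun (st : List String × List String × List String) test =>
              stepA st (test, (PySem.Dict.ofList u).getD test [])) ([], [], [])).1),
         ("Passed", ((PySem.Dict.ofList u).keys.foldl
            (fun (st : List String × List String × List String) test =>
              stepA st (test, (PySem.Dict.ofList u).getD test [])) ([], [], [])).2.1),
         ("Missing", ((PySem.Dict.ofList u).keys.foldl
            (fun (st : List String × List String × List String) test =>
              stepA st (test, (PySem.Dict.ofList u).getD test [])) ([], [], [])).2.2)] from rfl]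
  rw [hA, loop_eq_filters]
  simp
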